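-- pv_equiv track=rewrite | github.com/qxzeng6/internTest-DreamSchool | question_1.py | min_subsequence_to_reach_target
-- ===== SOURCE A (Python) =====
-- def min_subsequence_to_reach_target(source, target):
--     if not set(target).issubset(set(source)):
--         return -1
--     result, index = 0, 0
--     while index < len(target):
--         count = 0
--         for char in source:
--             if index < len(target) and char == target[index]:
--                 index += 1
--                 count += 1
--         if count == 0:
--             return -1
--
--         result += 1
--
--     return result
-- ===== SOURCE B (Python) =====
-- def min_subsequence_to_reach_target(source, target):
--     # Pointer walk over target: for each char find its next occurrence in
--     # source (C-level str.find), wrapping to a new pass when none remains.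
--     if not target:
--         return 0
--     passes, j = 1, 0
--     for ch in target:
--         k = source.find(ch, j)
--         if k == -1:
--             k = source.find(ch)
--             if k == -1:
--                 return -1
--             passes += 1
--         j = k + 1
--     return passes
-- ===== Notes on version B (the rewrite author's own statement) =====
-- stated objective: faster
-- what changed: Replaced A's repeated full passes over source (outer while on target index, inner Python-level for loop over every source char each pass) by a single walk over target that jumps with next-occurrence search (str.find with a start offset) and wraps on a miss, dropping the upfront set-subset precheck.
import Mathlib
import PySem

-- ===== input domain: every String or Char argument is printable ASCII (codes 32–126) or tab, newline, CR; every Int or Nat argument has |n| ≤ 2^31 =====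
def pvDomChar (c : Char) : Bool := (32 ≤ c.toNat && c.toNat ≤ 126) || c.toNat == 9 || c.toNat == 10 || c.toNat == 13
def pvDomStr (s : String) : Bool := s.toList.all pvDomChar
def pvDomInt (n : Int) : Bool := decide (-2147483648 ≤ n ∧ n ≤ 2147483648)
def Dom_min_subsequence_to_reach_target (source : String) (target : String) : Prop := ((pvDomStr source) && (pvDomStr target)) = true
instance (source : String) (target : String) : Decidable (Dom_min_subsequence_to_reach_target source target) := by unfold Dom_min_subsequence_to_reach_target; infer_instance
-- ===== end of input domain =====

-- B replaces A's pass-by-pass rescanning of `source` with a single pointer walk over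
-- `target` using next-occurrence search (str.find) that wraps on a miss; same return value.


-- ===== PORT A =====
-- the inner `for char in source` loop; state = (index, count)
def pvInnerA (tgt : List Char) : List Char → Nat → Nat → Nat × Nat
  | [], i, c => (i, c)
  | ch :: rest, i, c =>
      if tgt[i]? = some ch then pvInnerA tgt rest (i + 1) (c + 1)
      else pvInnerA tgt rest i c

-- termination helper for the outer while loop: index advances by exactly count
theorem pvInnerA_fst (tgt : List Char) : ∀ (rem : List Char) (i c : Nat),
    (pvInnerA tgt rem i c).1 + c = i + (pvInnerA tgt rem i c).2 ∧ c ≤ (pvInnerA tgt rem i c).2 := by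
  intro rem
  induction rem with
  | nil => intro i c; simp [pvInnerA]
  | cons h t ih =>
      intro i c
      by_cases hc : tgt[i]? = some h
      · simpa [pvInnerA, hc] using by have := ih (i + 1) (c + 1); omega
      · simpa [pvInnerA, hc] using by have := ih i c; omega

-- the outer `while index < len(target)` loop; result accumulates the pass count
def pvOuterA (src tgt : List Char) (i : Nat) (result : Int) : Int :=
  if _h : i < tgt.length then
    if (pvInnerA tgt src i 0).2 = 0 then -1
    else pvOuterA src tgt (pvInnerA tgt src i 0).1 (result + 1)
  else result
termination_by tgt.length - i
decreasing_by
  have h2 := pvInnerA_fst tgt src i 0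
  omega

def min_subsequence_to_reach_target (source : String) (target : String) : Int :=
  if !(PySem.Set.issubset (PySem.Set.ofList target.toList) (PySem.Set.ofList source.toList)) then -1
  else pvOuterA source.toList target.toList 0 0

-- ===== PORT B =====
-- the `for ch in target` loop; state = (passes, j); source.find(ch, j) / source.find(ch)
def pvLoopB (src : List Char) : List Char → Int → Int → Int
  | [], passes, _ => passes
  | ch :: ts, passes, j =>
      let k := PySem.Chars.findFrom src [ch] j
      if k = -1 then
        let k0 := PySem.Chars.find src [ch]
        if k0 = -1 then -1
        else pvLoopB src ts (passes + 1) (k0 + 1)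
      else pvLoopB src ts passes (k + 1)

def min_subsequence_to_reach_target_alt (source : String) (target : String) : Int :=
  if target.toList = [] then 0
  else pvLoopB source.toList target.toList 1 0

-- ===== PRECONDITION & SPEC =====
def Spec_min_subsequence_to_reach_target (source : String) (target : String) (out : Int) : Prop := out = min_subsequence_to_reach_target_alt source target
instance (source : String) (target : String) (out : Int) : Decidable (Spec_min_subsequence_to_reach_target source target out) := by unfold Spec_min_subsequence_to_reach_target; infer_instance

-- ===== CLAIM (what is proved, stated in full; the proofs are below) =====
def Claim_equal_min_subsequence_to_reach_target : Prop := ∀ (source : String) (target : String), Dom_min_subsequence_to_reach_target source target → Spec_min_subsequence_to_reach_target source target (min_subsequence_to_reach_target source target)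

-- ===== LEMMAS AND PROOFS =====

-- [c] is a prefix of m iff m starts with c
theorem pvSingleton_prefix (c : Char) (m : List Char) : [c] <+: m ↔ m.head? = some c := by
  constructor
  · rintro ⟨t, rfl⟩; rfl
  · intro h
    cases m with
    | nil => simp at h
    | cons a m' => cases h; exact ⟨m', rfl⟩

-- elementary characterisation of findIdx? for an equality predicate
theorem pvFindIdx?_spec (ch : Char) : ∀ (l : List Char) (n : Nat),
    l.findIdx? (fun c => c == ch) = some n → l[n]? = some ch ∧ ∀ j, j < n → l[j]? ≠ some ch := by
  intro l
  induction l with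
  | nil => intro n h; simp at h
  | cons h t ih =>
      intro n hn
      rw [List.findIdx?_cons] at hn
      by_cases hh : (h == ch) = true
      · rw [if_pos hh] at hn
        injection hn with hn0
        subst hn0
        exact ⟨by simpa using hh, by omega⟩
      · rw [if_neg hh] at hn
        rcases Option.map_eq_some_iff.1 hn with ⟨n2, hn2, rfl⟩
        obtain ⟨hg, hm⟩ := ih n2 hn2
        refine ⟨by simpa using hg, ?_⟩
        intro j hj
        cases j with
        | zero =>
            simp only [List.getElem?_cons_zero, ne_eq, Option.some.injEq]
            intro he; subst he; simp at hh
        | succ j2 =>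
            simp only [List.getElem?_cons_succ]
            exact hm j2 (by omega)

-- bridge: PySem's find on a single-character needle is List.findIdx?
theorem pvFind_char (l : List Char) (ch : Char) :
    PySem.Chars.find l [ch] =
      (match l.findIdx? (fun c => c == ch) with
       | some n => (n : Int)
       | none => -1) := by
  cases hfk : l.findIdx? (fun c => c == ch) with
  | none =>
      have hnm : ch ∉ l := by
        intro hm
        have := (List.findIdx?_eq_none_iff).1 hfk ch hm
        simp at this
      have : ¬ ([ch] <:+: l) := by
        intro hinf
        exact hnm (hinf.sublist.subset (by simp))
      simp [(PySem.Chars.find_eq_neg_one_iff l [ch]).2 this]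
  | some n =>
      obtain ⟨hget, hmin⟩ := pvFindIdx?_spec ch l n hfk
      -- [ch] <+: l.drop n
      have hpre : [ch] <+: l.drop n := by
        rw [pvSingleton_prefix, List.head?_drop]; exact hget
      have hinf : [ch] <:+: l := hpre.isInfix.trans (List.drop_suffix n l).isInfix
      have hne : PySem.Chars.find l [ch] ≠ -1 := by
        rw [ne_eq, PySem.Chars.find_eq_neg_one_iff]; simpa using hinf
      have hnonneg : 0 ≤ PySem.Chars.find l [ch] := by
        have := PySem.Chars.neg_one_le_find l [ch]; omega
      obtain ⟨hp, hm⟩ := PySem.Chars.find_spec (s := l) (sub := [ch]) hnonneg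
      have ht : (PySem.Chars.find l [ch]).toNat = n := by
        rcases Nat.lt_trichotomy (PySem.Chars.find l [ch]).toNat n with h | h | h
        · exfalso
          apply hmin _ h
          rw [← List.head?_drop, ← pvSingleton_prefix]; exact hp
        · exact h
        · exfalso; exact hm n h hpre
      simp only []
      omega

-- greedy count of target chars consumable in one pass over the remaining source
def pvNconsume : List Char → List Char → Nat
  | _, [] => 0
  | rem, ch :: ts =>
    match rem.findIdx? (fun c => c == ch) with
    | some k => 1 + pvNconsume (rem.drop (k + 1)) ts
    | none => 0

theorem pvNconsume_le : ∀ (ts rem : List Char), pvNconsume rem ts ≤ ts.length := by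
  intro ts
  induction ts with
  | nil => intro rem; simp [pvNconsume]
  | cons ch ts ih =>
      intro rem
      cases hfk : rem.findIdx? (fun c => c == ch) with
      | none => simp [pvNconsume, hfk]
      | some k => simp only [pvNconsume, hfk, List.length_cons]; have := ih (rem.drop (k + 1)); omega

-- reference walk: char-by-char next-occurrence with wrap; none = some char absent from src
def pvRef (src : List Char) : List Char → List Char → Int → Option Int
  | _, [], p => some p
  | rem, ch :: ts, p =>
    match rem.findIdx? (fun c => c == ch) with
    | some k => pvRef src (rem.drop (k + 1)) ts p
    | none =>
      match src.findIdx? (fun c => c == ch) with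
      | some k0 => pvRef src (src.drop (k0 + 1)) ts (p + 1)
      | none => none

-- A's inner loop leaves (i, c) unchanged when the current target char never matches
theorem pvInnerA_stop (tgt : List Char) : ∀ (rem : List Char) (i c : Nat),
    (∀ x ∈ rem, tgt[i]? ≠ some x) → pvInnerA tgt rem i c = (i, c) := by
  intro rem
  induction rem with
  | nil => intro i c _; rfl
  | cons h t ih =>
      intro i c hno
      have hh : ¬ (tgt[i]? = some h) := hno h (by simp)
      simp only [pvInnerA, if_neg hh]
      exact ih i c (fun x hx => hno x (by simp [hx]))

-- A's inner loop consumes the first occurrence of the current target char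
theorem pvInnerA_step (tgt : List Char) : ∀ (rem : List Char) (k : Nat) (i c : Nat) (ch : Char),
    tgt[i]? = some ch → rem.findIdx? (fun c => c == ch) = some k →
    pvInnerA tgt rem i c = pvInnerA tgt (rem.drop (k + 1)) (i + 1) (c + 1) := by
  intro rem
  induction rem with
  | nil => intro k i c ch _ hk; simp at hk
  | cons h t ih =>
      intro k i c ch hch hk
      rw [List.findIdx?_cons] at hk
      by_cases hh : (h == ch) = true
      · rw [if_pos hh] at hk
        injection hk with hk0
        subst hk0
        have he : h = ch := by simpa using hh
        subst he
        simp [pvInnerA, hch]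
      · rw [if_neg hh] at hk
        rcases Option.map_eq_some_iff.1 hk with ⟨k2, hk2, rfl⟩
        have hne : ¬ (tgt[i]? = some h) := by
          rw [hch]
          intro hcontr
          injection hcontr with he
          subst he
          simp at hh
        simp only [pvInnerA, if_neg hne, List.drop_succ_cons]
        exact ih k2 i c ch hch hk2

-- A's inner pass computes exactly the greedy consumption count
theorem pvInnerA_spec (tgt : List Char) : ∀ (n : Nat) (rem : List Char), rem.length ≤ n →
    ∀ (i c : Nat), pvInnerA tgt rem i c = (i + pvNconsume rem (tgt.drop i), c + pvNconsume rem (tgt.drop i)) := by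
  intro n
  induction n with
  | zero =>
      intro rem hlen i c
      have : rem = [] := List.length_eq_zero_iff.1 (by omega)
      subst this
      have h0 : pvNconsume [] (tgt.drop i) = 0 := by
        cases h : tgt.drop i <;> simp [pvNconsume]
      simp [pvInnerA, h0]
  | succ n ih =>
      intro rem hlen i c
      cases htg : tgt[i]? with
      | none =>
          have hdrop : tgt.drop i = [] := by
            rw [List.drop_eq_nil_iff]
            exact le_of_not_gt (fun h => by simp [List.getElem?_eq_getElem h] at htg)
          rw [pvInnerA_stop tgt rem i c (fun x _ => by simp [htg]), hdrop]
          simp [pvNconsume]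
      | some ch =>
          have hi : i < tgt.length := by
            by_contra h
            simp [List.getElem?_eq_none (le_of_not_gt h)] at htg
          have hdrop : tgt.drop i = ch :: tgt.drop (i + 1) := by
            rw [← List.getElem_cons_drop hi]
            congr 1
            have := List.getElem?_eq_getElem hi
            rw [htg] at this; exact (Option.some_injective _ this.symm)
          cases hfk : rem.findIdx? (fun c => c == ch) with
          | none =>
              have hstop : pvInnerA tgt rem i c = (i, c) := by
                apply pvInnerA_stop
                intro x hx
                rw [htg]
                intro hcontr
                have hxch : x = ch := by injection hcontr with h; exact h.symm
                have := (List.findIdx?_eq_none_iff).1 hfk x hx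
                simp [hxch] at this
              rw [hstop, hdrop]
              simp [pvNconsume, hfk]
          | some k =>
              have hne : rem ≠ [] := by intro h; subst h; simp at hfk
              have hklen : k < rem.length := ((List.findIdx?_eq_some_iff_findIdx_eq).1 hfk).1
              rw [pvInnerA_step tgt rem k i c ch htg hfk]
              rw [ih (rem.drop (k + 1)) (by simp [List.length_drop]; omega) (i + 1) (c + 1)]
              have hnc : pvNconsume rem (tgt.drop i) = 1 + pvNconsume (rem.drop (k + 1)) (tgt.drop (i + 1)) := by
                rw [hdrop]; simp [pvNconsume, hfk]
              rw [hnc]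
              simp [Prod.ext_iff]; omega

-- pass recomposition for the reference walk
theorem pvRef_pass (src : List Char) : ∀ (ts rem : List Char) (p : Int),
    pvRef src rem ts p =
      if pvNconsume rem ts = ts.length then some p
      else pvRef src src (ts.drop (pvNconsume rem ts)) (p + 1) := by
  intro ts
  induction ts with
  | nil => intro rem p; simp [pvRef, pvNconsume]
  | cons ch ts ih =>
      intro rem p
      cases hfk : rem.findIdx? (fun c => c == ch) with
      | some k =>
          simp only [pvRef, pvNconsume, hfk, List.length_cons]
          rw [ih (rem.drop (k + 1)) p]
          by_cases h : pvNconsume (rem.drop (k + 1)) ts = ts.length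
          · rw [if_pos h, if_pos (by omega)]
          · rw [if_neg h, if_neg (by omega)]
            have hd : (1 + pvNconsume (rem.drop (k + 1)) ts) = pvNconsume (rem.drop (k + 1)) ts + 1 := by omega
            rw [hd, List.drop_succ_cons]
      | none =>
          simp only [pvRef, pvNconsume, hfk, List.length_cons]
          have h0 : ¬ ((0 : Nat) = ts.length + 1) := by omega
          simp only [if_neg h0, List.drop_zero]
          cases hs : src.findIdx? (fun c => c == ch) <;> simp [pvRef, hs]

-- A's outer loop equals the reference walk started on a fresh pass
theorem pvOuterA_ref (src tgt : List Char) : ∀ (m : Nat) (i : Nat), tgt.length - i ≤ m →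
    ∀ (r : Int), pvOuterA src tgt i r =
      if tgt.length ≤ i then r else ((pvRef src src (tgt.drop i) (r + 1)).getD (-1)) := by
  intro m
  induction m with
  | zero =>
      intro i hle r
      rw [pvOuterA]
      have : ¬ (i < tgt.length) := by omega
      simp [this, le_of_not_gt this]
  | succ m ih =>
      intro i hle r
      by_cases hi : i < tgt.length
      · rw [pvOuterA, dif_pos hi]
        obtain ⟨n, hn⟩ : ∃ n, pvNconsume src (tgt.drop i) = n := ⟨_, rfl⟩
        have hspec := pvInnerA_spec tgt src.length src (le_refl _) i 0
        rw [hn] at hspec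
        have hdrop : tgt.drop i = tgt[i] :: tgt.drop (i + 1) := (List.getElem_cons_drop hi).symm
        have hlen_drop : (tgt.drop i).length = tgt.length - i := List.length_drop ..
        have hnle : n ≤ tgt.length - i := by
          have h1 := pvNconsume_le (tgt.drop i) src
          rw [hn] at h1; omega
        have h1 : (pvInnerA tgt src i 0).2 = 0 + n := by rw [hspec]
        have h2 : (pvInnerA tgt src i 0).1 = i + n := by rw [hspec]
        rw [h1, h2]
        by_cases hz : (0 + n) = 0
        · -- count = 0: current target char absent from src; both sides -1
          have hn0 : n = 0 := by omega
          rw [if_pos hz]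
          have hnone : src.findIdx? (fun c => c == tgt[i]) = none := by
            cases hs : src.findIdx? (fun c => c == tgt[i]) with
            | none => rfl
            | some k => rw [hdrop] at hn; simp [pvNconsume, hs] at hn; omega
          rw [if_neg (show ¬ tgt.length ≤ i by omega), hdrop]
          simp [pvRef, hnone]
        · rw [if_neg hz]
          have hnpos : 1 ≤ n := by omega
          rw [if_neg (show ¬ tgt.length ≤ i by omega)]
          rw [pvRef_pass src (tgt.drop i) src (r + 1), hn, hlen_drop]
          rw [ih (i + n) (by omega) (r + 1)]
          by_cases hfull : n = tgt.length - i
          · rw [if_pos hfull, if_pos (show tgt.length ≤ i + n by omega)]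
            simp
          · rw [if_neg hfull, if_neg (show ¬ tgt.length ≤ i + n by omega)]
            rw [List.drop_drop]
      · rw [pvOuterA]
        simp [hi, le_of_not_gt hi]

-- B's loop equals the reference walk with rem = src.drop j
theorem pvLoopB_ref (src : List Char) : ∀ (ts : List Char) (j : Nat), j ≤ src.length →
    ∀ (p : Int), pvLoopB src ts p (j : Int) = (pvRef src (src.drop j) ts p).getD (-1) := by
  intro ts
  induction ts with
  | nil => intro j _ p; simp [pvLoopB, pvRef]
  | cons ch ts ih =>
      intro j hj p
      have hff := PySem.Chars.findFrom_natCast src [ch] j hj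
      rw [pvFind_char (src.drop j) ch] at hff
      cases hfk : (src.drop j).findIdx? (fun c => c == ch) with
      | some k =>
          rw [hfk] at hff
          simp only [] at hff
          have hk_ne : ¬ ((k : Int) = -1) := by omega
          rw [if_neg hk_ne] at hff
          have hklen : k < (src.drop j).length := ((List.findIdx?_eq_some_iff_findIdx_eq).1 hfk).1
          rw [List.length_drop] at hklen
          have hne2 : ¬ ((j : Int) + (k : Int) = -1) := by
            have h0 : (0:Int) ≤ (j:Int) := Int.natCast_nonneg j
            have h1 : (0:Int) ≤ (k:Int) := Int.natCast_nonneg k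
            omega
          simp only [pvLoopB, hff]
          rw [if_neg hne2]
          have hcast : (j : Int) + (k : Int) + 1 = ((j + k + 1 : Nat) : Int) := by push_cast; ring
          rw [hcast, ih (j + k + 1) (by omega) p]
          simp only [pvRef, hfk]
          rw [List.drop_drop, Nat.add_assoc]
      | none =>
          rw [hfk] at hff
          simp only [if_pos rfl] at hff
          simp only [pvLoopB, hff, if_pos rfl]
          rw [pvFind_char src ch]
          cases hs : src.findIdx? (fun c => c == ch) with
          | none => simp [pvRef, hfk, hs]
          | some k0 =>
              simp only []
              have hk0_ne : ¬ ((k0 : Int) = -1) := by omega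
              rw [if_neg hk0_ne]
              have hk0len : k0 < src.length := ((List.findIdx?_eq_some_iff_findIdx_eq).1 hs).1
              have hcast : (k0 : Int) + 1 = ((k0 + 1 : Nat) : Int) := by push_cast; ring
              rw [hcast, ih (k0 + 1) (by omega) (p + 1)]
              simp [pvRef, hfk, hs]

-- the reference walk returns none when some target char is absent from src
theorem pvRef_none (src : List Char) : ∀ (ts rem : List Char) (p : Int),
    (∀ c ∈ rem, c ∈ src) → (∃ c ∈ ts, c ∉ src) → pvRef src rem ts p = none := by
  intro ts
  induction ts with
  | nil => intro rem p _ hw; simp at hw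
  | cons ch ts ih =>
      intro rem p hsub hw
      by_cases hch : ch ∈ src
      · have hw' : ∃ c ∈ ts, c ∉ src := by
          obtain ⟨c, hc, hcn⟩ := hw
          rcases List.mem_cons.1 hc with rfl | hc'
          · exact absurd hch hcn
          · exact ⟨c, hc', hcn⟩
        cases hfk : rem.findIdx? (fun c => c == ch) with
        | some k =>
            simp only [pvRef, hfk]
            exact ih (rem.drop (k + 1)) p (fun c hc => hsub c (List.mem_of_mem_drop hc)) hw'
        | none =>
            simp only [pvRef, hfk]
            cases hs : src.findIdx? (fun c => c == ch) with
            | none =>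
                exfalso
                have := (List.findIdx?_eq_none_iff).1 hs ch hch
                simp at this
            | some k0 =>
                exact ih (src.drop (k0 + 1)) (p + 1) (fun c hc => List.mem_of_mem_drop hc) hw'
      · have hrem : rem.findIdx? (fun c => c == ch) = none := by
          rw [List.findIdx?_eq_none_iff]
          intro x hx
          simp only [beq_eq_false_iff_ne, ne_eq]
          intro rfl_eq
          exact hch (by rw [← rfl_eq] at hch ⊢; exact hsub x hx)
        have hsrc : src.findIdx? (fun c => c == ch) = none := by
          rw [List.findIdx?_eq_none_iff]
          intro x hx
          simp only [beq_eq_false_iff_ne, ne_eq]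
          intro h; subst h; exact hch hx
        simp [pvRef, hrem, hsrc]

-- ===== VERDICT (by name: the statement is the Claim_ definition above) =====
theorem min_subsequence_to_reach_target_spec : Claim_equal_min_subsequence_to_reach_target := by
  intro source target _dom
  unfold Spec_min_subsequence_to_reach_target
  unfold min_subsequence_to_reach_target min_subsequence_to_reach_target_alt
  by_cases hemp : target.toList = []
  · have hsub : PySem.Set.issubset (PySem.Set.ofList target.toList) (PySem.Set.ofList source.toList) = true := by
      rw [PySem.Set.issubset_iff]
      intro x hx
      rw [PySem.Set.mem_ofList] at hx
      simp [hemp] at hx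
    rw [if_pos hemp, hsub]
    simp only [Bool.not_true, Bool.false_eq_true, if_false]
    rw [pvOuterA]
    simp [hemp]
  · rw [if_neg hemp]
    have hB : pvLoopB source.toList target.toList 1 0 =
        (pvRef source.toList source.toList target.toList 1).getD (-1) := by
      have := pvLoopB_ref source.toList target.toList 0 (by omega) 1
      simpa using this
    cases hsub : PySem.Set.issubset (PySem.Set.ofList target.toList) (PySem.Set.ofList source.toList) with
    | true =>
        simp only [Bool.not_true, Bool.false_eq_true, if_false]
        rw [pvOuterA_ref source.toList target.toList target.toList.length 0 (by omega) 0]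
        have hlen : ¬ (target.toList.length ≤ 0) := by
          intro h
          exact hemp (List.length_eq_zero_iff.1 (by omega))
        rw [if_neg hlen]
        simp only [List.drop_zero]
        rw [hB]
        norm_num
    | false =>
        simp only [Bool.not_false, if_true]
        have hw : ∃ c ∈ target.toList, c ∉ source.toList := by
          by_contra h
          push_neg at h
          have : PySem.Set.issubset (PySem.Set.ofList target.toList) (PySem.Set.ofList source.toList) = true := by
            rw [PySem.Set.issubset_iff]
            intro x hx
            rw [PySem.Set.mem_ofList] at hx ⊢
            exact h x hx
          rw [this] at hsub; exact absurd hsub (by simp)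
        rw [hB, pvRef_none source.toList target.toList source.toList 1 (fun c hc => hc) hw]
        rfl
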